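-- pv_equiv track=rewrite | github.com/TheGringo-ai/Aethera | aethera_router.py | _sanitize_reading
-- ===== SOURCE A (Python) =====
-- def _sanitize_reading(text: str) -> str:
--     """Remove any technical/AI content that leaked into a reading."""
--     _tech_patterns = [
--         "technical analysis", "actionable recommendation", "platform improvement",
--         "python", "API", "framework", "database", "concurrency", "garbage collection",
--         "memory leak", "El Gringo", "ElGringo", "multi-agent", "prompt overload",
--         "syntax error", "output validation", "locking mechanism", "race condition",
--         "feedback loop", "feedback system", "orchestrat", "implement",
--         "code suggestion", "engineering", "infrastructure",
--     ]
--     text = text.replace("**", "").strip()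
--     if any(tp.lower() in text.lower() for tp in _tech_patterns):
--         cleaned = []
--         for para in text.split("\n"):
--             if not any(tp.lower() in para.lower() for tp in _tech_patterns):
--                 cleaned.append(para)
--         text = "\n".join(cleaned).strip()
--     return text
-- ===== SOURCE B (Python) =====
-- # Different algorithm: instead of testing every line against every pattern, make ONE
-- # left-to-right sweep over the lowercased text, keeping a running line counter and
-- # marking the current line whenever some pattern starts at the current position;
-- # then keep the unmarked lines.  (A's outer any() guard disappears: with no marks
-- # the rebuild returns the stripped text unchanged.)
-- _TECH_PATTERNS_LOWER = [
--     "technical analysis", "actionable recommendation", "platform improvement",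
--     "python", "api", "framework", "database", "concurrency", "garbage collection",
--     "memory leak", "el gringo", "elgringo", "multi-agent", "prompt overload",
--     "syntax error", "output validation", "locking mechanism", "race condition",
--     "feedback loop", "feedback system", "orchestrat", "implement",
--     "code suggestion", "engineering", "infrastructure",
-- ]
--
-- def _sanitize_reading(text: str) -> str:
--     base = text.replace("**", "").strip()
--     low = base.lower()
--     bad = set()
--     line = 0
--     for j in range(len(low)):
--         if low[j] == "\n":
--             line += 1
--         elif any(low.startswith(p, j) for p in _TECH_PATTERNS_LOWER):
--             bad.add(line)
--     lines = base.split("\n")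
--     return "\n".join(ln for k, ln in enumerate(lines) if k not in bad).strip()
-- ===== Notes on version B (the rewrite author's own statement) =====
-- stated objective: alternative
-- what changed: Replaces A's line-major scheme (guard over the whole text, then for each line an any-over-patterns membership test) with a position-major single sweep: one pass over the lowercased text keeps a running line counter and marks the current line whenever a pattern starts at the current position, and the kept lines are read off the mark set; the outer any() guard is dropped, proved sound.
import Mathlib
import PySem

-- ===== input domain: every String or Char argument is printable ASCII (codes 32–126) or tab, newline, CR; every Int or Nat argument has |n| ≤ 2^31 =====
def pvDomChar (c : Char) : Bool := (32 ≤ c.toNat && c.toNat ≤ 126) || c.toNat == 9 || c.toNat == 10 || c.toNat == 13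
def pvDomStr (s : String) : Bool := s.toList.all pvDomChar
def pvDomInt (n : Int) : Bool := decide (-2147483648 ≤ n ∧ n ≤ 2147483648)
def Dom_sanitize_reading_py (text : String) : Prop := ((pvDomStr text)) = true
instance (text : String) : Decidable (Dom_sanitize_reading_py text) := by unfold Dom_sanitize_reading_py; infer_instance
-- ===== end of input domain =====

-- B replaces A's line-major filtering (per line, an any-over-patterns membership test)
-- by a position-major single sweep over the lowercased text with a running line
-- counter, marking the line of every position where a pattern starts (alternative
-- decomposition, similar cost; A's outer any() guard disappears, proved sound).

-- ===== PORT A =====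
def pvTechPatterns : List String := [
  "technical analysis", "actionable recommendation", "platform improvement",
  "python", "API", "framework", "database", "concurrency", "garbage collection",
  "memory leak", "El Gringo", "ElGringo", "multi-agent", "prompt overload",
  "syntax error", "output validation", "locking mechanism", "race condition",
  "feedback loop", "feedback system", "orchestrat", "implement",
  "code suggestion", "engineering", "infrastructure"]

def sanitize_reading_py (text : String) : String :=
  -- t = text.replace("**", "").strip()  (written out at each use; pure, evaluated equal)
  if pvTechPatterns.any (fun tp => PySem.Str.isIn (PySem.Str.lower tp)
      (PySem.Str.lower (PySem.Str.strip (PySem.Str.replace text "**" "")))) then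
    PySem.Str.strip (PySem.Str.join "\n"
      (((PySem.Str.split? (PySem.Str.strip (PySem.Str.replace text "**" "")) "\n").getD []).foldl
        (fun acc para =>
          if !(pvTechPatterns.any (fun tp => PySem.Str.isIn (PySem.Str.lower tp) (PySem.Str.lower para))) then
            acc ++ [para]
          else acc)
        []))
  else PySem.Str.strip (PySem.Str.replace text "**" "")

-- ===== PORT B =====
def pvTechPatternsLower : List String := [
  "technical analysis", "actionable recommendation", "platform improvement",
  "python", "api", "framework", "database", "concurrency", "garbage collection",
  "memory leak", "el gringo", "elgringo", "multi-agent", "prompt overload",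
  "syntax error", "output validation", "locking mechanism", "race condition",
  "feedback loop", "feedback system", "orchestrat", "implement",
  "code suggestion", "engineering", "infrastructure"]

def sanitize_reading_py_alt (text : String) : String :=
  let base := PySem.Str.strip (PySem.Str.replace text "**" "")
  let low := PySem.Str.lower base
  -- for j in range(len(low)): running (line, bad) state; low.startswith(p, j) is
  -- exact as startswith on low[j:] since 0 <= j < len(low)
  let st := (List.range low.toList.length).foldl
    (fun (st : Int × PySem.Set Int) (j : Nat) =>
      if PySem.Str.pyGet? low (j : Int) = some '\n' then (st.1 + 1, st.2)
      else if pvTechPatternsLower.any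
          (fun p => PySem.Chars.startswith (low.toList.drop j) p.toList) then
        (st.1, st.2.add st.1)
      else st)
    ((0 : Int), (PySem.Set.empty : PySem.Set Int))
  let lines := (PySem.Str.split? base "\n").getD []
  PySem.Str.strip (PySem.Str.join "\n"
    (((PySem.List.enumerate lines).filter (fun kl => !(st.2.contains kl.1))).map (·.2)))

-- ===== PRECONDITION & SPEC =====
def Spec_sanitize_reading_py (text : String) (out : String) : Prop := out = sanitize_reading_py_alt text
instance (text : String) (out : String) : Decidable (Spec_sanitize_reading_py text out) := by unfold Spec_sanitize_reading_py; infer_instance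

-- ===== CLAIM (what is proved, stated in full; the proofs are below) =====
def Claim_equal_sanitize_reading_py : Prop := ∀ (text : String), Dom_sanitize_reading_py text → Spec_sanitize_reading_py text (sanitize_reading_py text)

-- ===== LEMMAS AND PROOFS =====

-- intercalate of a snoc
theorem pv_intercalate_concat (sep y : List Char) (xs : List (List Char)) :
    List.intercalate sep (xs ++ [y]) =
      List.intercalate sep xs ++ (if xs = [] then [] else sep) ++ y := by
  induction xs with
  | nil => simp [List.intercalate, List.intersperse]
  | cons x xs ih =>
    cases xs with
    | nil => simp [List.intercalate, List.intersperse]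
    | cons z zs =>
      have h1 : List.intercalate sep (x :: ((z :: zs) ++ [y])) =
          x ++ sep ++ List.intercalate sep ((z :: zs) ++ [y]) := by
        simp [List.intercalate, List.intersperse]
      have h2 : List.intercalate sep (x :: z :: zs) =
          x ++ sep ++ List.intercalate sep (z :: zs) := by
        simp [List.intercalate, List.intersperse]
      simp only [List.cons_append] at h1 ih ⊢
      rw [h1, ih, h2]
      simp

-- the split loop, joined back with the separator, restores its input
theorem pv_go_intercalate (sep : List Char) (hsep : sep ≠ []) :
    ∀ (fuel : Nat) (l cur : List Char) (acc : List (List Char)), l.length ≤ fuel →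
      List.intercalate sep (PySem.Chars.splitOn.go sep fuel l cur acc) =
        List.intercalate sep acc.reverse ++ (if acc = [] then [] else sep) ++ cur.reverse ++ l := by
  intro fuel
  induction fuel with
  | zero =>
    intro l cur acc hl
    have hl0 : l = [] := List.eq_nil_of_length_eq_zero (Nat.le_zero.mp hl)
    subst hl0
    simp [PySem.Chars.splitOn.go, pv_intercalate_concat]
  | succ fuel ih =>
    intro l cur acc hl
    cases l with
    | nil =>
      simp [PySem.Chars.splitOn.go, pv_intercalate_concat]
    | cons c rest =>
      rw [PySem.Chars.splitOn.go]
      by_cases hpre : sep.isPrefixOf (c :: rest) = true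
      · rw [if_pos hpre]
        have hp : sep <+: (c :: rest) := List.isPrefixOf_iff_prefix.mp hpre
        obtain ⟨u, hu⟩ := hp
        have hsl : 1 ≤ sep.length := by
          cases sep with
          | nil => exact absurd rfl hsep
          | cons _ _ => simp
        have hdrop : List.drop sep.length (c :: rest) = u := by
          rw [← hu]; simp
        have hlen : (List.drop sep.length (c :: rest)).length ≤ fuel := by
          rw [hdrop]
          have : sep.length + u.length = (c :: rest).length := by
            rw [← hu]; simp
          simp only [List.length_cons] at hl this
          omega
        rw [ih _ _ _ hlen, hdrop]
        rw [List.reverse_cons, pv_intercalate_concat, ← hu]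
        by_cases hacc : acc = []
        · subst hacc; simp
        · simp [hacc, List.append_assoc]
      · rw [if_neg hpre]
        have hlen : rest.length ≤ fuel := by
          simp only [List.length_cons] at hl; omega
        rw [ih _ _ _ hlen]
        simp

theorem pv_splitOn_intercalate (s sep : List Char) (hsep : sep ≠ []) :
    List.intercalate sep (PySem.Chars.splitOn s sep) = s := by
  unfold PySem.Chars.splitOn
  rw [pv_go_intercalate sep hsep (s.length + 1) s [] [] (by omega)]
  simp [List.intercalate]

-- strip is idempotent
theorem pv_strip_idem (s : List Char) :
    PySem.Chars.strip (PySem.Chars.strip s) = PySem.Chars.strip s := by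
  unfold PySem.Chars.strip PySem.Chars.rstrip PySem.Chars.lstrip
  set x := List.dropWhile PySem.Chars.isspace s with hx
  set y := (List.dropWhile PySem.Chars.isspace x.reverse).reverse with hy
  have hyx : y <+: x := by
    have hsuf : List.dropWhile PySem.Chars.isspace x.reverse <:+ x.reverse :=
      List.dropWhile_suffix _
    rw [hy]
    rcases hsuf with ⟨u, hu⟩
    exact ⟨u.reverse, by rw [← List.reverse_append, hu, List.reverse_reverse]⟩
  have hdropy : List.dropWhile PySem.Chars.isspace y = y := by
    cases hv : y with
    | nil => simp
    | cons a t =>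
      rcases hyx with ⟨u, hu⟩
      rw [hv] at hu
      have h1 : List.dropWhile PySem.Chars.isspace s = a :: (t ++ u) := by
        rw [← hx, ← hu]; simp
      have hne : List.dropWhile PySem.Chars.isspace s ≠ [] := by simp [h1]
      have h2 := List.head_dropWhile_not PySem.Chars.isspace hne
      have h3 : (List.dropWhile PySem.Chars.isspace s).head hne = a := by
        simp [h1]
      rw [h3] at h2
      simp [h2]
  rw [hdropy]
  have hone : List.dropWhile PySem.Chars.isspace y.reverse = y.reverse := by
    rw [hy, List.reverse_reverse]
    exact List.dropWhile_idempotent ..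
  rw [hone, List.reverse_reverse]

-- lowering a character yields '\n' exactly on '\n'
theorem pv_lowerChar_newline (c : Char) : PySem.Chars.lowerChar c = '\n' ↔ c = '\n' := by
  unfold PySem.Chars.lowerChar
  by_cases h : PySem.Chars.isupper c = true
  · rw [if_pos h]
    simp only [PySem.Chars.isupper, Bool.and_eq_true, decide_eq_true_eq] at h
    obtain ⟨h1, h2⟩ := h
    rw [Char.le_def] at h1 h2
    have h1' : 65 ≤ c.toNat := by simpa using h1
    have h2' : c.toNat ≤ 90 := by simpa using h2
    have hval : (Char.ofNat (c.toNat + 32)).toNat = c.toNat + 32 := by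
      unfold Char.ofNat
      rw [dif_pos (by exact Or.inl (by omega) : Nat.isValidChar (c.toNat + 32))]
      rfl
    constructor
    · intro he
      exfalso
      have h10 : (Char.ofNat (c.toNat + 32)).toNat = ('\n').toNat := by rw [he]
      rw [hval] at h10
      have h10' : ('\n').toNat = 10 := by decide
      omega
    · intro he
      exfalso
      rw [he] at h1'
      have : ('\n').toNat = 10 := by decide
      omega
  · simp [h]

-- pieces produced by splitOn at '\n' contain no '\n'
theorem pv_go_no_sep :
    ∀ (fuel : Nat) (l cur : List Char) (acc : List (List Char)), l.length ≤ fuel →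
      (∀ a ∈ acc, ('\n' : Char) ∉ a) → ('\n' : Char) ∉ cur →
      ∀ x ∈ PySem.Chars.splitOn.go ['\n'] fuel l cur acc, ('\n' : Char) ∉ x := by
  intro fuel
  induction fuel with
  | zero =>
    intro l cur acc hl hacc hcur
    have hl0 : l = [] := List.eq_nil_of_length_eq_zero (Nat.le_zero.mp hl)
    subst hl0
    simp only [PySem.Chars.splitOn.go]
    intro x hx
    simp only [List.mem_reverse, List.mem_cons] at hx
    rcases hx with h | h
    · subst h; intro hmem; simp at hmem; exact hcur hmem
    · exact hacc x h
  | succ fuel ih =>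
    intro l cur acc hl hacc hcur
    cases l with
    | nil =>
      simp only [PySem.Chars.splitOn.go]
      intro x hx
      simp only [List.mem_reverse, List.mem_cons] at hx
      rcases hx with h | h
      · subst h; intro hmem; exact hcur (List.mem_reverse.mp hmem)
      · exact hacc x h
    | cons c rest =>
      rw [PySem.Chars.splitOn.go]
      by_cases hpre : List.isPrefixOf ['\n'] (c :: rest) = true
      · rw [if_pos hpre]
        apply ih
        · simp at hl ⊢; omega
        · intro a ha
          simp only [List.mem_cons] at ha
          rcases ha with h | h
          · subst h; intro hmem; exact hcur (List.mem_reverse.mp hmem)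
          · exact hacc a h
        · simp
      · rw [if_neg hpre]
        apply ih
        · simp at hl ⊢; omega
        · exact hacc
        · intro hmem
          simp only [List.mem_cons] at hmem
          rcases hmem with h | h
          · apply hpre
            simp [List.isPrefixOf, ← h]
          · exact hcur h

theorem pv_splitOn_no_newline (s : List Char) :
    ∀ x ∈ PySem.Chars.splitOn s ['\n'], ('\n' : Char) ∉ x := by
  unfold PySem.Chars.splitOn
  exact pv_go_no_sep (s.length + 1) s [] [] (by omega) (by simp) (by simp)

-- splitting the lowercased text = lowercasing the split pieces
theorem pv_go_map_lower :
    ∀ (fuel : Nat) (l cur : List Char) (acc : List (List Char)),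
      PySem.Chars.splitOn.go ['\n'] fuel (l.map PySem.Chars.lowerChar)
          (cur.map PySem.Chars.lowerChar) (acc.map (List.map PySem.Chars.lowerChar)) =
        (PySem.Chars.splitOn.go ['\n'] fuel l cur acc).map (List.map PySem.Chars.lowerChar) := by
  intro fuel
  induction fuel with
  | zero =>
    intro l cur acc
    cases l <;> simp [PySem.Chars.splitOn.go, List.map_reverse]
  | succ fuel ih =>
    intro l cur acc
    cases l with
    | nil => simp [PySem.Chars.splitOn.go, List.map_reverse]
    | cons c rest =>
      have hpre : List.isPrefixOf ['\n'] (PySem.Chars.lowerChar c :: rest.map PySem.Chars.lowerChar) =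
          List.isPrefixOf ['\n'] (c :: rest) := by
        have hlc := pv_lowerChar_newline c
        by_cases h : c = '\n'
        · subst h
          have : PySem.Chars.lowerChar '\n' = '\n' := by decide
          rw [this]
          simp [List.isPrefixOf]
        · have h2 : PySem.Chars.lowerChar c ≠ '\n' := fun he => h (hlc.mp he)
          simp [List.isPrefixOf, eq_comm, h]
          exact fun he => h2 he.symm
      rw [List.map_cons, PySem.Chars.splitOn.go, PySem.Chars.splitOn.go, hpre]
      by_cases hc : List.isPrefixOf ['\n'] (c :: rest) = true
      · rw [if_pos hc, if_pos hc]
        have hreq : List.drop ['\n'].length (PySem.Chars.lowerChar c :: rest.map PySem.Chars.lowerChar) =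
            (List.drop ['\n'].length (c :: rest)).map PySem.Chars.lowerChar := by simp
        rw [hreq]
        have := ih (List.drop ['\n'].length (c :: rest)) [] ((cur.reverse) :: acc)
        simpa [List.map_reverse] using this
      · rw [if_neg hc, if_neg hc]
        have := ih rest (c :: cur) acc
        simpa [List.map_reverse] using this

theorem pv_splitOn_lower (s : List Char) :
    PySem.Chars.splitOn (PySem.Chars.lower s) ['\n'] =
      (PySem.Chars.splitOn s ['\n']).map PySem.Chars.lower := by
  unfold PySem.Chars.splitOn PySem.Chars.lower
  rw [List.length_map]
  exact pv_go_map_lower (s.length + 1) s [] []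

-- every pattern is nonempty and newline-free
theorem pv_patterns_ok :
    ∀ p ∈ pvTechPatternsLower, p.toList ≠ [] ∧ ('\n' : Char) ∉ p.toList := by
  decide

-- the sweep: its line counter counts the newlines seen, its mark set contains
-- exactly the newline-counts of the positions where some pattern starts
theorem pv_loop_spec (low : String) (n : Nat) :
    (((List.range n).foldl
      (fun (st : Int × PySem.Set Int) (j : Nat) =>
        if PySem.Str.pyGet? low (j : Int) = some '\n' then (st.1 + 1, st.2)
        else if pvTechPatternsLower.any
            (fun p => PySem.Chars.startswith (low.toList.drop j) p.toList) then
          (st.1, st.2.add st.1)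
        else st)
      ((0 : Int), (PySem.Set.empty : PySem.Set Int))).1 =
        (((low.toList.take n).count '\n' : Nat) : Int)) ∧
    (∀ k : Int, (((List.range n).foldl
      (fun (st : Int × PySem.Set Int) (j : Nat) =>
        if PySem.Str.pyGet? low (j : Int) = some '\n' then (st.1 + 1, st.2)
        else if pvTechPatternsLower.any
            (fun p => PySem.Chars.startswith (low.toList.drop j) p.toList) then
          (st.1, st.2.add st.1)
        else st)
      ((0 : Int), (PySem.Set.empty : PySem.Set Int))).2.contains k = true ↔
      ∃ i < n, low.toList[i]? ≠ some '\n' ∧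
        pvTechPatternsLower.any (fun p => PySem.Chars.startswith (low.toList.drop i) p.toList) = true ∧
        (((low.toList.take i).count '\n' : Nat) : Int) = k)) := by
  induction n with
  | zero =>
    constructor
    · simp
    · intro k
      simp [PySem.Set.contains, PySem.Set.empty]
  | succ n ih =>
    obtain ⟨ih1, ih2⟩ := ih
    rw [List.range_succ]
    simp only [List.foldl_append, List.foldl_cons, List.foldl_nil]
    -- name the state after n steps
    set st := (List.range n).foldl
      (fun (st : Int × PySem.Set Int) (j : Nat) =>
        if PySem.Str.pyGet? low (j : Int) = some '\n' then (st.1 + 1, st.2)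
        else if pvTechPatternsLower.any
            (fun p => PySem.Chars.startswith (low.toList.drop j) p.toList) then
          (st.1, st.2.add st.1)
        else st)
      ((0 : Int), (PySem.Set.empty : PySem.Set Int)) with hst
    by_cases hnl : PySem.Str.pyGet? low (n : Int) = some '\n'
    · rw [if_pos hnl]
      have hn : low.toList[n]? = some '\n' := by
        rw [← PySem.Str.pyGet?_natCast]; exact hnl
      have hlt : n < low.toList.length := by
        by_contra hge
        rw [List.getElem?_eq_none (by omega)] at hn
        simp at hn
      have htake : low.toList.take (n+1) = low.toList.take n ++ ['\n'] := by
        rw [List.take_add_one, hn]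
        rfl
      constructor
      · simp only [htake, List.count_append, ih1]
        push_cast
        simp
      · intro k
        rw [ih2 k]
        constructor
        · rintro ⟨i, hi, h⟩; exact ⟨i, by omega, h⟩
        · rintro ⟨i, hi, h1, h2, h3⟩
          refine ⟨i, ?_, h1, h2, h3⟩
          rcases Nat.lt_succ_iff_lt_or_eq.mp hi with h | h
          · exact h
          · subst h; rw [hn] at h1; exact absurd rfl h1
    · rw [if_neg hnl]
      have hnn : low.toList[n]? ≠ some '\n' := by
        rw [← PySem.Str.pyGet?_natCast]; exact hnl
      have htake : (low.toList.take (n+1)).count '\n' = (low.toList.take n).count '\n' := by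
        rw [List.take_add_one, List.count_append]
        cases hx : low.toList[n]? with
        | none => simp
        | some c =>
          have : c ≠ '\n' := fun he => hnn (by rw [hx, he])
          simp [Option.toList, this]
      by_cases hocc : pvTechPatternsLower.any
          (fun p => PySem.Chars.startswith (low.toList.drop n) p.toList) = true
      · rw [if_pos hocc]
        constructor
        · simpa [htake] using ih1
        · intro k
          have hadd : (st.2.add st.1).contains k = true ↔ st.2.contains k = true ∨ k = st.1 := by
            rw [PySem.Set.contains_iff, PySem.Set.contains_iff]
            · exact PySem.Set.mem_add st.2 st.1 k
          rw [hadd, ih2 k, ih1]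
          constructor
          · rintro (⟨i, hi, h⟩ | hk)
            · exact ⟨i, by omega, h⟩
            · exact ⟨n, by omega, hnn, hocc, hk.symm⟩
          · rintro ⟨i, hi, h1, h2, h3⟩
            rcases Nat.lt_succ_iff_lt_or_eq.mp hi with h | h
            · exact Or.inl ⟨i, h, h1, h2, h3⟩
            · subst h; exact Or.inr h3.symm
      · rw [if_neg hocc]
        constructor
        · simpa [htake] using ih1
        · intro k
          rw [ih2 k]
          constructor
          · rintro ⟨i, hi, h⟩; exact ⟨i, by omega, h⟩
          · rintro ⟨i, hi, h1, h2, h3⟩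
            rcases Nat.lt_succ_iff_lt_or_eq.mp hi with h | h
            · exact ⟨i, h, h1, h2, h3⟩
            · subst h; exact absurd h2 hocc

-- occurrences of a newline-free pattern in an intercalation, keyed by the number of
-- newlines before the occurrence, are exactly the pieces containing the pattern
theorem pv_occ_line (p : List Char) (hp : p ≠ []) (hpn : ('\n' : Char) ∉ p) :
    ∀ (L : List (List Char)) (k : Nat), (∀ l ∈ L, ('\n' : Char) ∉ l) →
      ((∃ u v, List.intercalate ['\n'] L = u ++ (p ++ v) ∧ u.count '\n' = k) ↔
        ∃ l, L[k]? = some l ∧ p <:+: l) := by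
  intro L
  induction L with
  | nil =>
    intro k _
    simp only [List.intercalate, List.intersperse]
    constructor
    · rintro ⟨u, v, h, -⟩
      exact absurd (List.append_eq_nil_iff.mp ((List.append_eq_nil_iff.mp h.symm).2)).1 hp
    · rintro ⟨l, hl, -⟩
      simp at hl
  | cons x L' ih =>
    intro k hL
    have hx : ('\n' : Char) ∉ x := hL x (by simp)
    cases L' with
    | nil =>
      have hI1 : List.intercalate ['\n'] [x] = x := by simp [List.intercalate]
      rw [hI1]
      constructor
      · rintro ⟨u, v, h, hk⟩
        have hu0 : u.count '\n' = 0 := by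
          apply List.count_eq_zero.mpr
          intro hm
          exact hx (h ▸ (List.mem_append.mpr (Or.inl hm)))
        have hk0 : k = 0 := by omega
        subst hk0
        exact ⟨x, by simp, ⟨u, v, by rw [h]; simp⟩⟩
      · rintro ⟨l, hl, a, b, hab⟩
        have hk0 : k = 0 := by
          by_contra hne
          cases k with
          | zero => exact hne rfl
          | succ j => simp at hl
        subst hk0
        simp at hl
        subst hl
        refine ⟨a, b, by rw [← hab]; simp, ?_⟩
        apply List.count_eq_zero.mpr
        intro hm
        exact hx (hab ▸ (by simp [hm] : ('\n':Char) ∈ a ++ p ++ b))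
    | cons y t =>
      have hI : List.intercalate ['\n'] (x :: y :: t) =
          x ++ '\n' :: List.intercalate ['\n'] (y :: t) := by
        simp [List.intercalate, List.intersperse]
      set T := List.intercalate ['\n'] (y :: t) with hT
      have ih' := fun k => ih k (fun l hl => hL l (by simp [hl]))
      constructor
      · rintro ⟨u, v, h, hk⟩
        rw [hI] at h
        rcases Nat.lt_or_ge x.length u.length with hlen | hlen
        · -- u extends past x and the separator
          have hupre : u <+: x ++ '\n' :: T := ⟨p ++ v, h.symm⟩
          have hxpre : x ++ ['\n'] <+: x ++ '\n' :: T := by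
            refine ⟨T, by simp⟩
          have hxu : x ++ ['\n'] <+: u :=
            List.prefix_of_prefix_length_le hxpre hupre (by simp; omega)
          obtain ⟨u', hu'⟩ := hxu
          have hu : u = x ++ '\n' :: u' := by rw [← hu']; simp
          subst hu
          have hTeq : T = u' ++ (p ++ v) := by
            have := h
            simp only [List.append_assoc, List.cons_append, List.append_cancel_left_eq] at this
            simpa using this
          have hcount : (x ++ '\n' :: u').count '\n' = u'.count '\n' + 1 := by
            rw [List.count_append]
            rw [List.count_eq_zero.mpr (fun hm => hx hm)]
            simp
          rw [hcount] at hk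
          obtain ⟨l, hl, hinf⟩ := (ih' (u'.count '\n')).mp ⟨u', v, hTeq, rfl⟩
          refine ⟨l, ?_, hinf⟩
          have : k = u'.count '\n' + 1 := hk.symm
          subst this
          simpa using hl
        · rcases Nat.lt_or_ge x.length (u.length + p.length) with hlen2 | hlen2
          · -- the occurrence would cover the separator: impossible
            exfalso
            have h1 : (x ++ '\n' :: T)[x.length]? = some '\n' := by
              rw [List.getElem?_append_right (le_refl x.length)]
              simp
            rw [h] at h1
            have h2 : (u ++ (p ++ v))[x.length]? = (p ++ v)[x.length - u.length]? := by
              rw [List.getElem?_append_right hlen]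
            have h3 : (p ++ v)[x.length - u.length]? = p[x.length - u.length]? := by
              rw [List.getElem?_append_left (by omega)]
            rw [h2, h3] at h1
            exact hpn (List.mem_of_getElem? h1)
          · -- the occurrence lies inside x
            have hup : u ++ p <+: x ++ '\n' :: T := by
              refine ⟨v, by rw [h]; simp⟩
            have hxpre : x <+: x ++ '\n' :: T := ⟨'\n' :: T, rfl⟩
            have hupx : u ++ p <+: x :=
              List.prefix_of_prefix_length_le hup hxpre (by simp only [List.length_append]; omega)
            obtain ⟨w, hw⟩ := hupx
            have hu0 : u.count '\n' = 0 := by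
              apply List.count_eq_zero.mpr
              intro hm
              exact hx (hw ▸ (by simp [hm] : ('\n':Char) ∈ (u ++ p) ++ w))
            have hk0 : k = 0 := by omega
            subst hk0
            exact ⟨x, by simp, ⟨u, w, hw⟩⟩
      · rintro ⟨l, hl, hinf⟩
        cases k with
        | zero =>
          simp at hl
          subst hl
          obtain ⟨a, b, hab⟩ := hinf
          refine ⟨a, b ++ '\n' :: T, ?_, ?_⟩
          · rw [hI, ← hab]; simp
          · apply List.count_eq_zero.mpr
            intro hm
            exact hx (hab ▸ (by simp [hm] : ('\n':Char) ∈ a ++ p ++ b))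
        | succ j =>
          have hl' : (y :: t)[j]? = some l := by simpa using hl
          obtain ⟨u', v, hTeq, hcnt⟩ := (ih' j).mpr ⟨l, hl', hinf⟩
          refine ⟨x ++ '\n' :: u', v, ?_, ?_⟩
          · rw [hI, hTeq]; simp
          · rw [List.count_append, List.count_eq_zero.mpr (fun hm => hx hm)]
            simp [hcnt]

-- prefix-at-a-position form of an occurrence with its newline count
theorem pv_pos_occ (cs p : List Char) (hp : p ≠ []) (k : Nat) :
    (∃ i < cs.length, p <+: cs.drop i ∧ (cs.take i).count '\n' = k) ↔
      (∃ u v, cs = u ++ (p ++ v) ∧ u.count '\n' = k) := by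
  constructor
  · rintro ⟨i, hi, ⟨v, hv⟩, hk⟩
    exact ⟨cs.take i, v, by rw [hv]; exact (List.take_append_drop i cs).symm, hk⟩
  · rintro ⟨u, v, hcs, hk⟩
    refine ⟨u.length, ?_, ⟨v, ?_⟩, ?_⟩
    · subst hcs
      simp
      cases p with
      | nil => exact absurd rfl hp
      | cons a b => simp
    · subst hcs; simp
    · subst hcs; simp [hk]

-- an index-predicate filter over enumerate equals an element filter
theorem pv_enumerate_filter {α : Type} (q : Int → Bool) (keep : α → Bool) :
    ∀ (xs : List α) (s : Int), (∀ (k : Nat) x, xs[k]? = some x → q (s + k) = keep x) →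
      ((PySem.List.enumerate xs s).filter (fun kl => q kl.1)).map (·.2) = xs.filter keep := by
  intro xs
  induction xs with
  | nil => intro s h; simp [PySem.List.enumerate]
  | cons x t ih =>
    intro s h
    have h0 : q s = keep x := by simpa using h 0 x (by simp)
    rw [PySem.List.enumerate]
    by_cases hq : q s = true
    · rw [List.filter_cons]
      simp only [hq]
      rw [List.filter_cons]
      simp only [← h0, hq]
      simp only [if_true]
      rw [List.map_cons]
      congr 1
      apply ih
      intro k y hy
      have := h (k+1) y (by simpa using hy)
      push_cast at this ⊢
      rw [← this]; ring_nf
    · have hq' : q s = false := by revert hq; cases q s <;> simp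
      rw [List.filter_cons, List.filter_cons]
      simp only [hq', ← h0]
      simp only [if_false, Bool.false_eq_true]
      apply ih
      intro k y hy
      have := h (k+1) y (by simpa using hy)
      push_cast at this ⊢
      rw [← this]; ring_nf

-- every joined piece is an infix of the joined string
theorem pv_mem_intercalate_infix (sep p : List Char) (ps : List (List Char))
    (hp : p ∈ ps) : p <:+: List.intercalate sep ps := by
  induction ps with
  | nil => simp at hp
  | cons q t ih =>
    rcases List.mem_cons.mp hp with h | h
    · subst h
      cases t with
      | nil => simp [List.intercalate, List.intersperse]
      | cons z zs =>
        have : List.intercalate sep (p :: z :: zs) = p ++ sep ++ List.intercalate sep (z :: zs) := by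
          simp [List.intercalate, List.intersperse]
        rw [this]
        exact ((List.prefix_append p (sep ++ List.intercalate sep (z :: zs))).trans
          (by simp)).isInfix
    · cases t with
      | nil => simp at h
      | cons z zs =>
        have hrw : List.intercalate sep (q :: z :: zs) = q ++ sep ++ List.intercalate sep (z :: zs) := by
          simp [List.intercalate, List.intersperse]
        rw [hrw]
        exact (ih h).trans (List.suffix_append _ _).isInfix

-- ===== VERDICT (by name: the statement is the Claim_ definition above) =====
set_option maxHeartbeats 1000000 in
theorem sanitize_reading_py_spec : Claim_equal_sanitize_reading_py := by
  unfold Claim_equal_sanitize_reading_py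
  intro text _
  unfold Spec_sanitize_reading_py sanitize_reading_py sanitize_reading_py_alt
  simp only []
  generalize ht : PySem.Str.strip (PySem.Str.replace text "**" "") = t
  obtain ⟨w, hw⟩ : ∃ w, t = PySem.Str.strip w := ⟨_, ht.symm⟩
  clear ht
  set low := PySem.Str.lower t with hlow
  have hlcs : low.toList = PySem.Chars.lower t.toList := PySem.Str.toList_lower t
  have hsplit : PySem.Str.split? t "\n" =
      some ((PySem.Chars.splitOn t.toList ['\n']).map String.ofList) := by
    simp [PySem.Str.split?, PySem.Chars.split?]
  set linesC : List (List Char) := PySem.Chars.splitOn t.toList ['\n'] with hlinesC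
  have hlines : (PySem.Str.split? t "\n").getD [] = linesC.map String.ofList := by
    rw [hsplit]; rfl
  have hjoinC : List.intercalate ['\n'] linesC = t.toList :=
    pv_splitOn_intercalate t.toList ['\n'] (by simp)
  have hlowsplit : PySem.Chars.splitOn low.toList ['\n'] = linesC.map PySem.Chars.lower := by
    rw [hlcs, pv_splitOn_lower]
  have hjoinL : List.intercalate ['\n'] (linesC.map PySem.Chars.lower) = low.toList := by
    rw [← hlowsplit]
    exact pv_splitOn_intercalate low.toList ['\n'] (by simp)
  have hnlL : ∀ l ∈ linesC.map PySem.Chars.lower, ('\n' : Char) ∉ l := by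
    rw [← hlowsplit]
    exact pv_splitOn_no_newline low.toList
  -- A's per-line keep test
  set keepA : String → Bool := fun para =>
    !(pvTechPatterns.any (fun tp => PySem.Str.isIn (PySem.Str.lower tp) (PySem.Str.lower para)))
    with hkeepA
  -- the sweep's mark set
  set bad := ((List.range low.toList.length).foldl
      (fun (st : Int × PySem.Set Int) (j : Nat) =>
        if PySem.Str.pyGet? low (j : Int) = some '\n' then (st.1 + 1, st.2)
        else if pvTechPatternsLower.any
            (fun p => PySem.Chars.startswith (low.toList.drop j) p.toList) then
          (st.1, st.2.add st.1)
        else st)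
      ((0 : Int), (PySem.Set.empty : PySem.Set Int))).2 with hbad
  have hloop := (pv_loop_spec low low.toList.length).2
  -- the mark set, read at a line index, is A's (negated) keep test of that line
  have hmark : ∀ (k : Nat) (para : String), (linesC.map String.ofList)[k]? = some para →
      (bad.contains ((0 : Int) + (k : Int)) = true ↔ keepA para = false) := by
    intro k para hk
    rw [List.getElem?_map] at hk
    cases hc : linesC[k]? with
    | none => rw [hc] at hk; simp at hk
    | some c =>
      rw [hc] at hk
      have hpara : para = String.ofList c := by
        simpa using hk.symm
      have hz : ((0 : Int) + (k : Int)) = (k : Int) := by ring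
      rw [← hbad] at hloop
      rw [hz, hloop ((k : Int))]
      -- step 1: drop the not-a-newline conjunct and flatten the any
      have step1 : (∃ i < low.toList.length, low.toList[i]? ≠ some '\n' ∧
          pvTechPatternsLower.any (fun p => PySem.Chars.startswith (low.toList.drop i) p.toList) = true ∧
          (((low.toList.take i).count '\n' : Nat) : Int) = (k : Int)) ↔
          (∃ p ∈ pvTechPatternsLower, ∃ i < low.toList.length,
            p.toList <+: low.toList.drop i ∧ (low.toList.take i).count '\n' = k) := by
        constructor
        · rintro ⟨i, hi, -, hany, hcnt⟩
          obtain ⟨p, hpmem, hpre⟩ := List.any_eq_true.mp hany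
          refine ⟨p, hpmem, i, hi, ?_, ?_⟩
          · exact List.isPrefixOf_iff_prefix.mp hpre
          · exact_mod_cast hcnt
        · rintro ⟨p, hpmem, i, hi, hpre, hcnt⟩
          obtain ⟨hpne, hpnl⟩ := pv_patterns_ok p hpmem
          refine ⟨i, hi, ?_, ?_, by exact_mod_cast hcnt⟩
          · intro hnl
            obtain ⟨v, hv⟩ := hpre
            cases hpt : p.toList with
            | nil => exact hpne hpt
            | cons a b =>
              rw [hpt] at hv
              have h0 : low.toList[i]? = some a := by
                have h1 : (low.toList.drop i)[0]? = low.toList[i + 0]? := List.getElem?_drop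
                rw [Nat.add_zero] at h1
                rw [← h1, ← hv]
                simp
              rw [h0] at hnl
              have : a = '\n' := by simpa using hnl
              exact hpnl (by rw [hpt, this]; simp)
          · exact List.any_eq_true.mpr ⟨p, hpmem, List.isPrefixOf_iff_prefix.mpr hpre⟩
      rw [step1]
      -- step 2: occurrences keyed k = pattern inside piece k of the lowered split
      have step2 : ∀ p : String, p ∈ pvTechPatternsLower →
          ((∃ i < low.toList.length, p.toList <+: low.toList.drop i ∧
            (low.toList.take i).count '\n' = k) ↔
           PySem.Str.isIn p (PySem.Str.lower para) = true) := by
        intro p hpmem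
        obtain ⟨hpne, hpnl⟩ := pv_patterns_ok p hpmem
        rw [pv_pos_occ low.toList p.toList hpne k]
        rw [← hjoinL]
        rw [pv_occ_line p.toList hpne hpnl (linesC.map PySem.Chars.lower) k hnlL]
        constructor
        · rintro ⟨l, hl, hinf⟩
          rw [List.getElem?_map, hc] at hl
          have hl' : l = PySem.Chars.lower c := by simpa using hl.symm
          subst hl'
          rw [PySem.Str.isIn_iff_infix, PySem.Str.toList_lower, hpara]
          simpa using hinf
        · intro hin
          refine ⟨PySem.Chars.lower c, ?_, ?_⟩
          · rw [List.getElem?_map, hc]; rfl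
          · have := (PySem.Str.isIn_iff_infix _ _).mp hin
            rw [PySem.Str.toList_lower, hpara] at this
            simpa using this
      have hkf : keepA para = false ↔
          pvTechPatternsLower.any (fun p => PySem.Str.isIn p (PySem.Str.lower para)) = true := by
        rw [hkeepA]
        have hPL : pvTechPatternsLower = pvTechPatterns.map PySem.Str.lower := rfl
        rw [hPL, List.any_map]
        cases pvTechPatterns.any (fun tp => PySem.Str.isIn (PySem.Str.lower tp) (PySem.Str.lower para)) <;>
          simp [Function.comp]
      rw [hkf]
      constructor
      · rintro ⟨p, hpmem, hocc⟩
        exact List.any_eq_true.mpr ⟨p, hpmem, (step2 p hpmem).mp hocc⟩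
      · intro hany
        obtain ⟨p, hpmem, hin⟩ := List.any_eq_true.mp hany
        exact ⟨p, hpmem, (step2 p hpmem).mpr hin⟩
  -- B's enumerate-filter = a plain filter by A's keep test
  have hfilter : ((PySem.List.enumerate (linesC.map String.ofList)).filter
      (fun kl => !(bad.contains kl.1))).map (·.2) = (linesC.map String.ofList).filter keepA := by
    refine pv_enumerate_filter (fun z => !(bad.contains z)) keepA (linesC.map String.ofList) 0 ?_
    intro k x hx
    have h := hmark k x hx
    show (!(bad.contains ((0 : Int) + (k : Int)))) = keepA x
    cases hk2 : keepA x
    · rw [h.mpr hk2]; rfl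
    · have hb : bad.contains ((0 : Int) + (k : Int)) = false := by
        cases hb : bad.contains ((0 : Int) + (k : Int))
        · rfl
        · rw [h.mp hb] at hk2; exact absurd hk2 (by simp)
      rw [hb]; rfl
  rw [hlines, hfilter]
  by_cases hg : pvTechPatterns.any
      (fun tp => PySem.Str.isIn (PySem.Str.lower tp) (PySem.Str.lower t)) = true
  · -- guard true: A filters the same lines with the same test
    rw [if_pos hg]
    rw [PySem.List.foldl_append_if_eq_filter
      (fun para => !(pvTechPatterns.any
        (fun tp => PySem.Str.isIn (PySem.Str.lower tp) (PySem.Str.lower para))))]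
    rw [List.nil_append, ← hkeepA]
  · -- guard false: no pattern occurs, the filter keeps everything and join undoes split
    rw [if_neg hg]
    have hclean : ∀ tp ∈ pvTechPatterns,
        PySem.Str.isIn (PySem.Str.lower tp) (PySem.Str.lower t) = false := by
      intro tp htp
      have := List.any_eq_false.mp (Bool.eq_false_iff.mpr hg) tp htp
      simpa using this
    have hall : ∀ line ∈ linesC.map String.ofList, keepA line = true := by
      intro line hline
      rcases List.mem_map.mp hline with ⟨cs, hcs, rfl⟩
      rw [hkeepA]
      simp only [Bool.not_eq_true']
      apply List.any_eq_false.mpr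
      intro tp htp
      by_contra hcontra
      have hin : PySem.Str.isIn (PySem.Str.lower tp) (PySem.Str.lower (String.ofList cs)) = true := by
        revert hcontra
        cases PySem.Str.isIn (PySem.Str.lower tp) (PySem.Str.lower (String.ofList cs)) <;> simp
      have hinf : PySem.Chars.lower tp.toList <:+: PySem.Chars.lower cs := by
        have := (PySem.Str.isIn_iff_infix _ _).mp hin
        rwa [PySem.Str.toList_lower (String.ofList cs), String.toList_ofList,
          PySem.Str.toList_lower tp] at this
      have hcst : cs <:+: t.toList := by
        rw [← hjoinC]
        exact pv_mem_intercalate_infix ['\n'] cs linesC hcs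
      have hlow : PySem.Chars.lower cs <:+: PySem.Chars.lower t.toList := by
        unfold PySem.Chars.lower
        exact List.IsInfix.map _ hcst
      have : PySem.Str.isIn (PySem.Str.lower tp) (PySem.Str.lower t) = true := by
        apply (PySem.Str.isIn_iff_infix _ _).mpr
        rw [PySem.Str.toList_lower tp, PySem.Str.toList_lower t]
        exact hinf.trans hlow
      rw [hclean tp htp] at this
      exact Bool.false_ne_true this
    rw [List.filter_eq_self.mpr hall]
    have hjoin2 : PySem.Str.join "\n" (linesC.map String.ofList) = String.ofList t.toList := by
      unfold PySem.Str.join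
      congr 1
      rw [List.map_map]
      have : (String.toList ∘ String.ofList) = id := by
        funext cs; simp [String.toList_ofList]
      rw [this, List.map_id]
      exact hjoinC
    rw [hjoin2]
    have hstript : PySem.Str.strip (String.ofList t.toList) = t := by
      unfold PySem.Str.strip
      rw [String.toList_ofList, hw]
      unfold PySem.Str.strip
      rw [String.toList_ofList, pv_strip_idem]
    rw [hstript]
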